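-- pv_equiv track=rewrite | github.com/varvarakoshman/algorithms_workout_python | algoExpert/easy/GenerateDocument.py | generate_document_2
-- ===== SOURCE A (Python) =====
-- def generate_document_2(characters, document):
--     counted_cache = {}
--     for char in document:
--         if char in counted_cache.keys():
--             continue
--         count_doc = get_char_сount(document, char)
--         count_chars = get_char_сount(characters, char)
--         if count_chars < count_doc:
--             return False
--         counted_cache[char] = count_doc
--     return True
--
-- def get_char_сount(char_seq, target_char):
--     count = 0
--     for char in char_seq:
--         if char == target_char:
--             count += 1
--     return count
-- ===== SOURCE B (Python) =====
-- def generate_document_2(characters, document):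
--     freq = {}
--     for ch in characters:
--         freq[ch] = freq.get(ch, 0) + 1
--     for ch in document:
--         if freq.get(ch, 0) == 0:
--             return False
--         freq[ch] = freq[ch] - 1
--     return True
-- ===== Notes on version B (the rewrite author's own statement) =====
-- stated objective: alternative
-- what changed: A rescans both whole strings per distinct document character (nested scans plus a seen-cache of counts); B builds a frequency table of characters once and consumes it in a single decrementing pass over document, with different control flow (fails on an exhausted tally entry).
import Mathlib
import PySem

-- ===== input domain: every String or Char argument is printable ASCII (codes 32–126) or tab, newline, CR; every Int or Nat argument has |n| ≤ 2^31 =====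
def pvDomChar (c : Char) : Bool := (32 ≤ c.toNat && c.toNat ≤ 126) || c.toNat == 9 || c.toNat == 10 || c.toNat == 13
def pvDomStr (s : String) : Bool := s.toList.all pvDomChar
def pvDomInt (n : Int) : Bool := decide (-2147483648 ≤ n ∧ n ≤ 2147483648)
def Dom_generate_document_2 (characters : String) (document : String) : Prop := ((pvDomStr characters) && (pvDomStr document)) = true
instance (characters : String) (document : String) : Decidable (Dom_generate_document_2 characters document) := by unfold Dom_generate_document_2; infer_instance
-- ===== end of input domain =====

-- ===== PORT A =====
-- B builds a frequency table of `characters` once and consumes it in a single decrementing pass over `document`; A rescans both strings per distinct document char. Objective: alternative decomposition.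

-- helper get_char_сount from A (ASCII name)
def get_char_count (char_seq : List Char) (target_char : Char) : Int :=
  char_seq.foldl (fun count char => if char == target_char then count + 1 else count) 0

-- A's main loop over `document`, with the early returns as recursion results
def genDocLoopA (characters : List Char) (document : List Char) :
    List Char → PySem.Dict Char Int → Bool
  | [], _ => true
  | char :: rest, counted_cache =>
    if counted_cache.contains char then
      genDocLoopA characters document rest counted_cache
    else
      let count_doc := get_char_count document char
      let count_chars := get_char_count characters char
      if count_chars < count_doc then false
      else genDocLoopA characters document rest (counted_cache.insert char count_doc)

def generate_document_2 (characters : String) (document : String) : Bool :=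
  genDocLoopA characters.toList document.toList document.toList PySem.Dict.empty

-- ===== PORT B =====
-- B's second loop: decrement the running tally, fail on an exhausted entry
def genDocLoopB : List Char → PySem.Dict Char Int → Bool
  | [], _ => true
  | ch :: rest, freq =>
    if freq.getD ch 0 == 0 then false
    else genDocLoopB rest (freq.insert ch (freq.getD ch 0 - 1))

def generate_document_2_alt (characters : String) (document : String) : Bool :=
  let freq := characters.toList.foldl (fun d ch => d.insert ch (d.getD ch 0 + 1)) PySem.Dict.empty
  genDocLoopB document.toList freq

-- ===== PRECONDITION & SPEC =====
def Spec_generate_document_2 (characters : String) (document : String) (out : Bool) : Prop := out = generate_document_2_alt characters document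
instance (characters : String) (document : String) (out : Bool) : Decidable (Spec_generate_document_2 characters document out) := by unfold Spec_generate_document_2; infer_instance

-- ===== CLAIM (what is proved, stated in full; the proofs are below) =====
def Claim_equal_generate_document_2 : Prop := ∀ (characters : String) (document : String), Dom_generate_document_2 characters document → Spec_generate_document_2 characters document (generate_document_2 characters document)

-- ===== LEMMAS AND PROOFS =====

theorem get_char_count_eq (l : List Char) (c : Char) :
    get_char_count l c = (l.count c : Int) := by
  unfold get_char_count
  have h : ∀ (init : Int), l.foldl (fun count char => if char == c then count + 1 else count) init
      = init + (l.count c : Int) := by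
    induction l with
    | nil => intro init; simp
    | cons x xs ih =>
      intro init
      simp only [List.foldl]
      by_cases hx : x = c
      · rw [if_pos (by simp [hx]), ih]
        have hc : (x :: xs).count c = xs.count c + 1 := by simp [List.count_cons, hx]
        rw [hc]; push_cast; ring
      · rw [if_neg (by simp [hx]), ih]
        have hc : (x :: xs).count c = xs.count c := by simp [List.count_cons, hx]
        rw [hc]
  simpa using h 0

theorem genDocLoopB_spec (rest : List Char) (freq : PySem.Dict Char Int)
    (hnn : ∀ d, 0 ≤ freq.getD d 0) :
    genDocLoopB rest freq = decide (∀ c ∈ rest, (rest.count c : Int) ≤ freq.getD c 0) := by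
  induction rest generalizing freq with
  | nil => simp [genDocLoopB]
  | cons ch rest ih =>
    by_cases h0 : freq.getD ch 0 = 0
    · have hnot : ¬ (∀ c ∈ ch :: rest, ((ch :: rest).count c : Int) ≤ freq.getD c 0) := by
        intro hall
        have h1 := hall ch (by simp)
        rw [h0] at h1
        have h2 : ((ch :: rest).count ch : Int) = rest.count ch + 1 := by
          simp [List.count_cons]
        omega
      rw [genDocLoopB, if_pos (by simp [h0])]
      exact (decide_eq_false hnot).symm
    · have hpos : 1 ≤ freq.getD ch 0 := by have := hnn ch; omega
      have hnn' : ∀ d, 0 ≤ (freq.insert ch (freq.getD ch 0 - 1)).getD d 0 := by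
        intro d
        rw [PySem.Dict.getD_insert]
        split_ifs with hd
        · subst hd; omega
        · exact hnn d
      have hrec := ih (freq.insert ch (freq.getD ch 0 - 1)) hnn'
      have hiff : (∀ c ∈ rest, (rest.count c : Int) ≤ (freq.insert ch (freq.getD ch 0 - 1)).getD c 0)
          ↔ (∀ c ∈ ch :: rest, ((ch :: rest).count c : Int) ≤ freq.getD c 0) := by
      

        constructor
        · intro hall c hc
          rcases List.mem_cons.mp hc with rfl | hc'
          · by_cases hm : c ∈ rest
            · have h1 := hall c hm
              rw [PySem.Dict.getD_insert, if_pos rfl] at h1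
              have h2 : ((c :: rest).count c : Int) = rest.count c + 1 := by simp [List.count_cons]
              omega
            · have h1 : rest.count c = 0 := List.count_eq_zero.mpr hm
              have h2 : ((c :: rest).count c : Int) = rest.count c + 1 := by simp [List.count_cons]
              omega
          · have h1 := hall c hc'
            rw [PySem.Dict.getD_insert] at h1
            by_cases hd : c = ch
            · subst hd
              rw [if_pos rfl] at h1
              have h2 : ((c :: rest).count c : Int) = rest.count c + 1 := by simp [List.count_cons]
              omega
            · rw [if_neg hd] at h1
              have h2 : ((ch :: rest).count c : Int) = rest.count c := by
                simp [List.count_cons, Ne.symm hd]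
              omega
        · intro hall c hc
          have h1 := hall c (List.mem_cons_of_mem _ hc)
          rw [PySem.Dict.getD_insert]
          by_cases hd : c = ch
          · subst hd
            rw [if_pos rfl]
            have h2 : ((c :: rest).count c : Int) = rest.count c + 1 := by simp [List.count_cons]
            omega
          · rw [if_neg hd]
            have h2 : ((ch :: rest).count c : Int) = rest.count c := by
              simp [List.count_cons, Ne.symm hd]
            omega
      rw [genDocLoopB, if_neg (by simp [h0]), hrec]
      exact decide_eq_decide.mpr hiff

theorem genDocLoopA_spec (characters document : List Char) (rest : List Char)
    (cache : PySem.Dict Char Int)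
    (hcache : ∀ d, cache.contains d = true → (document.count d : Int) ≤ characters.count d) :
    genDocLoopA characters document rest cache
      = decide (∀ c ∈ rest, (document.count c : Int) ≤ characters.count c) := by
  induction rest generalizing cache with
  | nil => simp [genDocLoopA]
  | cons ch rest ih =>
    by_cases hmem : cache.contains ch = true
    · have hch := hcache ch hmem
      rw [genDocLoopA, if_pos hmem, ih cache hcache]
      apply decide_eq_decide.mpr
      constructor
      · intro hall c hc
        rcases List.mem_cons.mp hc with rfl | hc'
        · exact hch
        · exact hall c hc'
      · intro hall c hc
        exact hall c (List.mem_cons_of_mem _ hc)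
    · rw [genDocLoopA, if_neg (by simpa using hmem)]
      simp only [get_char_count_eq]
      by_cases hlt : (characters.count ch : Int) < (document.count ch : Int)
      · rw [if_pos hlt]
        have hnot : ¬ (∀ c ∈ ch :: rest, (document.count c : Int) ≤ characters.count c) := by
          intro hall
          have := hall ch (by simp)
          omega
        exact (decide_eq_false hnot).symm
      · rw [if_neg hlt]
        have hch : (document.count ch : Int) ≤ characters.count ch := by omega
        have hcache' : ∀ d, (cache.insert ch (document.count ch : Int)).contains d = true →
            (document.count d : Int) ≤ characters.count d := by
          intro d hd
          rw [PySem.Dict.contains_insert] at hd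
          rcases (by simpa using hd : d = ch ∨ cache.contains d = true) with rfl | hd'
          · exact hch
          · exact hcache d hd'
        rw [ih _ hcache']
        apply decide_eq_decide.mpr
        constructor
        · intro hall c hc
          rcases List.mem_cons.mp hc with rfl | hc'
          · exact hch
          · exact hall c hc'
        · intro hall c hc
          exact hall c (List.mem_cons_of_mem _ hc)

-- ===== VERDICT (by name: the statement is the Claim_ definition above) =====
theorem generate_document_2_spec : Claim_equal_generate_document_2 := by
  intro characters document _
  unfold Spec_generate_document_2 generate_document_2 generate_document_2_alt
  rw [genDocLoopA_spec characters.toList document.toList document.toList PySem.Dict.empty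
      (by intro d hd; simp [PySem.Dict.contains_empty] at hd)]
  rw [PySem.Dict.foldl_insert_getD_add_one_eq_counter]
  rw [genDocLoopB_spec document.toList (PySem.Dict.counter characters.toList)
      (by intro d; rw [PySem.Dict.getD_counter]; positivity)]
  apply decide_eq_decide.mpr
  constructor
  · intro h c hc
    have h1 := h c hc
    rw [PySem.Dict.getD_counter]
    omega
  · intro h c hc
    have h1 := h c hc
    rw [PySem.Dict.getD_counter] at h1
    omega
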